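-- pv_equiv track=rewrite | github.com/erinlee316/cs61-A | projects/cats/cats.py | furry_fixes
-- ===== SOURCE A (Python) =====
-- def furry_fixes(typed, source, limit):
--     """A diff function for autocorrect that determines how many letters
--     in TYPED need to be substituted to create SOURCE, then adds the difference in
--     their lengths and returns the result.
--
--     Arguments:
--         typed: a starting word
--         source: a string representing a desired goal word
--         limit: a number representing an upper bound on the number of chars that must change
--
--     >>> big_limit = 10
--     >>> furry_fixes("nice", "rice", big_limit)    # Substitute: n -> r
--     1
--     >>> furry_fixes("range", "rungs", big_limit)  # Substitute: a -> u, e -> s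
--     2
--     >>> furry_fixes("pill", "pillage", big_limit) # Don't substitute anything, length difference of 3.
--     3
--     >>> furry_fixes("roses", "arose", big_limit)  # Substitute: r -> a, o -> r, s -> o, e -> s, s -> e
--     5
--     >>> furry_fixes("rose", "hello", big_limit)   # Substitute: r->h, o->e, s->l, e->l, length difference of 1.
--     5
--     """
--     # BEGIN PROBLEM 6
--     # return difference when typed or source word is empty
--     if len(typed) == 0 or len(source) == 0:
--         return abs(len(typed) - len(source))
--
--     # typed word exceeds limit of different word length
--     elif abs(len(typed) - len(source)) > limit:
--         return abs(len(typed) - len(source))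
--
--     else:
--         # character matches in both types and source word
--         if typed[0] == source[0]:
--             return furry_fixes(typed[1:], source[1:], limit)
--
--         # character doesn't match in typed and source word
--         # decrement remaining limit by 1
--         # add 1 for number of substitutions needed
--         else:
--             return 1 + furry_fixes(typed[1:], source[1:], limit - 1)
-- ===== SOURCE B (Python) =====
-- def furry_fixes(typed, source, limit):
--     diff = abs(len(typed) - len(source))
--     if diff > limit:
--         return diff
--     mismatches = sum(1 for a, b in zip(typed, source) if a != b)
--     return min(mismatches + diff, limit + 1)
-- ===== Notes on version B (the rewrite author's own statement) =====
-- stated objective: simpler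
-- what changed: Replaced the per-character recursion with a limit decrement and early exit by one closed-form computation: a single zip pass counting mismatches, then min(mismatches + length-diff, limit + 1), with the raw length-diff returned when it already exceeds limit.
import Mathlib
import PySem

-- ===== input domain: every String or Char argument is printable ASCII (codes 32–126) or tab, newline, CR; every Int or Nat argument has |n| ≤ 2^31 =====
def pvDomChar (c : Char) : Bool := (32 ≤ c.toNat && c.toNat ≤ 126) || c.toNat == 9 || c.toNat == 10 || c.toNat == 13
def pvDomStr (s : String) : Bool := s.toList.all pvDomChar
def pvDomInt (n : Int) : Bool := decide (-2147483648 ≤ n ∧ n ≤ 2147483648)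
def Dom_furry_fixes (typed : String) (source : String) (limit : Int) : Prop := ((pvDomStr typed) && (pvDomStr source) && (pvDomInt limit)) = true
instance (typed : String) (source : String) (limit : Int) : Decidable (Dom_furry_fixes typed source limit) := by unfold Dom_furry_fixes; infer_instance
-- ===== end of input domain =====

-- B replaces A's pruned recursion by one zip pass counting mismatches plus an arithmetic cap (simpler; same values).

-- ===== PORT A =====
-- literal port of A's recursion over the two character lists
def furryFixesRec (t s : List Char) (limit : Int) : Int :=
  if h : t.length = 0 ∨ s.length = 0 then
    (((t.length : Int) - (s.length : Int)).natAbs : Int)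
  else if (((t.length : Int) - (s.length : Int)).natAbs : Int) > limit then
    (((t.length : Int) - (s.length : Int)).natAbs : Int)
  else if t.head? = s.head? then
    furryFixesRec t.tail s.tail limit
  else
    1 + furryFixesRec t.tail s.tail (limit - 1)
termination_by t.length
decreasing_by
  all_goals simp only [List.length_tail]; omega

def furry_fixes (typed : String) (source : String) (limit : Int) : Int :=
  furryFixesRec typed.toList source.toList limit

-- ===== PORT B =====
-- sum(1 for a,b in zip(typed,source) if a!=b)
def mismCount (l : List (Char × Char)) (acc : Int) : Int :=
  match l with
  | [] => acc
  | p :: rest => mismCount rest (if p.1 ≠ p.2 then acc + 1 else acc)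

def furry_fixes_alt (typed : String) (source : String) (limit : Int) : Int :=
  let diff : Int := (((typed.toList.length : Int) - (source.toList.length : Int)).natAbs : Int)
  if diff > limit then diff
  else min (mismCount (typed.toList.zip source.toList) 0 + diff) (limit + 1)

-- ===== PRECONDITION & SPEC =====
def Spec_furry_fixes (typed : String) (source : String) (limit : Int) (out : Int) : Prop := out = furry_fixes_alt typed source limit
instance (typed : String) (source : String) (limit : Int) (out : Int) : Decidable (Spec_furry_fixes typed source limit out) := by unfold Spec_furry_fixes; infer_instance

-- ===== CLAIM (what is proved, stated in full; the proofs are below) =====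
def Claim_equal_furry_fixes : Prop := ∀ (typed : String) (source : String) (limit : Int), Dom_furry_fixes typed source limit → Spec_furry_fixes typed source limit (furry_fixes typed source limit)

-- ===== LEMMAS AND PROOFS =====

theorem mismCount_shift (l : List (Char × Char)) (acc : Int) :
    mismCount l acc = acc + mismCount l 0 := by
  induction l generalizing acc with
  | nil => simp [mismCount]
  | cons p rest ih =>
    simp only [mismCount]
    rw [ih ((if p.1 ≠ p.2 then acc + 1 else acc)), ih ((if p.1 ≠ p.2 then (0:Int) + 1 else 0))]
    split_ifs <;> omega

theorem mismCount_nonneg (l : List (Char × Char)) : 0 ≤ mismCount l 0 := by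
  induction l with
  | nil => simp [mismCount]
  | cons p rest ih =>
    simp only [mismCount]
    rw [mismCount_shift]
    split_ifs <;> omega

theorem furryFixesRec_eq (t s : List Char) (limit : Int) :
    furryFixesRec t s limit =
      if (((t.length : Int) - (s.length : Int)).natAbs : Int) > limit then
        (((t.length : Int) - (s.length : Int)).natAbs : Int)
      else min (mismCount (t.zip s) 0 + (((t.length : Int) - (s.length : Int)).natAbs : Int)) (limit + 1) := by
  induction t generalizing s limit with
  | nil =>
    rw [furryFixesRec, dif_pos (by simp)]
    simp only [List.zip_nil_left, mismCount, List.length_nil]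
    split_ifs <;> omega
  | cons a t ih =>
    cases s with
    | nil =>
      rw [furryFixesRec, dif_pos (by simp)]
      simp only [List.zip_nil_right, mismCount, List.length_nil]
      split_ifs <;> omega
    | cons b s =>
      rw [furryFixesRec, dif_neg (by simp)]
      have hnn := mismCount_nonneg (t.zip s)
      simp only [List.length_cons, List.head?_cons, List.tail_cons, List.zip_cons_cons,
        Option.some.injEq]
      by_cases hab : a = b
      · subst hab
        rw [if_pos rfl, ih s limit]
        have hm : mismCount ((a, a) :: t.zip s) 0 = mismCount (t.zip s) 0 := by
          simp [mismCount]
        rw [hm]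
        simp only [min_def]
        split_ifs <;> omega
      · rw [if_neg hab, ih s (limit - 1)]
        have hm : mismCount ((a, b) :: t.zip s) 0 = 1 + mismCount (t.zip s) 0 := by
          simp only [mismCount]
          rw [if_pos (show (a, b).1 ≠ (a, b).2 from hab), mismCount_shift]
          omega
        rw [hm]
        simp only [min_def]
        split_ifs <;> omega

-- ===== VERDICT (by name: the statement is the Claim_ definition above) =====
theorem furry_fixes_spec : Claim_equal_furry_fixes := by
  intro typed source limit _
  unfold Spec_furry_fixes furry_fixes furry_fixes_alt
  rw [furryFixesRec_eq]
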